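-- pv_equiv track=rewrite | github.com/febaenziger/programming-assignments | csc243hw7.py | recSpaceCount
-- ===== SOURCE A (Python) =====
-- def recSpaceCount(s):
--     'recursively returns the number of white spaces in the string parameter'
--     if len(s) == 0:
--         return 0
--     else:
--         if s[0].isspace() == True:
--             add = recSpaceCount(s[1:])
--             return add + 1
--         else:
--             return recSpaceCount(s[1:])
-- ===== SOURCE B (Python) =====
-- def recSpaceCount(s):
--     'iteratively returns the number of white spaces in the string parameter'
--     count = 0
--     for c in s:
--         if c.isspace():
--             count += 1
--     return count
-- ===== Notes on version B (the rewrite author's own statement) =====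
-- stated objective: simpler
-- what changed: Replaced A's tail recursion with O(n) slicing at each step by a single flat for-loop with a counter accumulator.
import Mathlib
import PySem

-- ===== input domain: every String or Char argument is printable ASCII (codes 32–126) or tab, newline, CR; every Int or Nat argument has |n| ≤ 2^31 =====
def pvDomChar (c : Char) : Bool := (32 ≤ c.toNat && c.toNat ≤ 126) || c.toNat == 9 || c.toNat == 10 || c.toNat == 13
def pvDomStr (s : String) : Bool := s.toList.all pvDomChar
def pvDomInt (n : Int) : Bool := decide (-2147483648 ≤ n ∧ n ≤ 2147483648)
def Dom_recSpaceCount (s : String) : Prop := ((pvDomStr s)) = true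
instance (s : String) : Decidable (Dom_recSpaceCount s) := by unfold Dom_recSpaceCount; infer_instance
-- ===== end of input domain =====

-- B replaces A's recursion (with per-step slicing) by one flat loop with a counter.

-- ===== PORT A =====
-- A's recursion on s: base case empty, test s[0].isspace(), recurse on s[1:].
def recSpaceCountGo : List Char → Int
  | [] => 0
  | c :: rest =>
      if PySem.Chars.isspace c = true then recSpaceCountGo rest + 1
      else recSpaceCountGo rest

def recSpaceCount (s : String) : Int := recSpaceCountGo s.toList

-- ===== PORT B =====
-- B's flat loop: count starts at 0, each whitespace char increments it.
def recSpaceCount_alt (s : String) : Int :=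
  s.toList.foldl (fun count c => if PySem.Chars.isspace c then count + 1 else count) 0

-- ===== PRECONDITION & SPEC =====
def Spec_recSpaceCount (s : String) (out : Int) : Prop := out = recSpaceCount_alt s
instance (s : String) (out : Int) : Decidable (Spec_recSpaceCount s out) := by unfold Spec_recSpaceCount; infer_instance

-- ===== CLAIM (what is proved, stated in full; the proofs are below) =====
def Claim_equal_recSpaceCount : Prop := ∀ (s : String), Dom_recSpaceCount s → Spec_recSpaceCount s (recSpaceCount s)

-- ===== LEMMAS AND PROOFS =====
theorem recSpaceCountGo_foldl (cs : List Char) (acc : Int) :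
    cs.foldl (fun count c => if PySem.Chars.isspace c then count + 1 else count) acc
      = acc + recSpaceCountGo cs := by
  induction cs generalizing acc with
  | nil => simp [recSpaceCountGo]
  | cons c rest ih =>
      simp only [List.foldl, recSpaceCountGo]
      by_cases h : PySem.Chars.isspace c
      · simp [h, ih]; omega
      · simp [h, ih]

-- ===== VERDICT (by name: the statement is the Claim_ definition above) =====
theorem recSpaceCount_spec : Claim_equal_recSpaceCount := by
  intro s _
  unfold Spec_recSpaceCount recSpaceCount recSpaceCount_alt
  rw [recSpaceCountGo_foldl]
  omega
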